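-- pv_equiv track=rewrite | github.com/anmerino-pnd/sina | src/sina/tools/zone_detector_v2.py | _find_continuous_gaps
-- ===== SOURCE A (Python) =====
-- def _find_continuous_gaps(condition_array, min_gap_size):
--     """Encuentra gaps continuos."""
--     gaps = []
--     in_gap = False
--     gap_start = 0
--
--     for i, is_gap in enumerate(condition_array):
--         if is_gap and not in_gap:
--             gap_start = i
--             in_gap = True
--         elif not is_gap and in_gap:
--             if i - gap_start >= min_gap_size:
--                 gaps.append((gap_start + i) // 2)
--             in_gap = False
--
--     return gaps
-- ===== SOURCE B (Python) =====
-- def _find_continuous_gaps(condition_array, min_gap_size):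
--     """Encuentra gaps continuos (two-stage: run-length encode, then filter runs)."""
--     # stage 1: run-length encode by truthiness -> [key, start, length]
--     runs = []
--     idx = 0
--     for v in condition_array:
--         k = bool(v)
--         if runs and runs[-1][0] == k:
--             runs[-1][2] += 1
--         else:
--             runs.append([k, idx, 1])
--         idx += 1
--     # stage 2: gap runs that are not the final run and are long enough
--     return [(2 * start + length) // 2
--             for k, start, length in runs[:-1]
--             if k and length >= min_gap_size]
-- ===== Notes on version B (the rewrite author's own statement) =====
-- stated objective: alternative
-- what changed: Replaces A's single-pass in_gap flag state machine with a two-stage pipeline: run-length encode the array by truthiness into (key, start, length) runs, then emit midpoints of the qualifying gap runs among the non-final runs.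
import Mathlib
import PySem

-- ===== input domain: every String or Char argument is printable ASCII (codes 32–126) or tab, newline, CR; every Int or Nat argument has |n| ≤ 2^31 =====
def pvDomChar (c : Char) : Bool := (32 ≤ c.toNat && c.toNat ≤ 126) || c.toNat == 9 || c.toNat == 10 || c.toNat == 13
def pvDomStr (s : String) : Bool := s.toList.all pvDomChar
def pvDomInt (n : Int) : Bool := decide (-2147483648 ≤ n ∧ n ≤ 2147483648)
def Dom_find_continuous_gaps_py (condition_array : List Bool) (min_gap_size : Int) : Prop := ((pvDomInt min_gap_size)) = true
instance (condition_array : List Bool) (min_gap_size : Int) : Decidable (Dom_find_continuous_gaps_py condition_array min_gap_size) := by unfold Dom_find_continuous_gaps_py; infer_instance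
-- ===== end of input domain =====

-- B replaces A's in_gap flag/state machine with a two-stage pipeline (run-length encode by
-- truthiness, then filter the non-final runs); objective: alternative decomposition, same cost.

-- ===== PORT A =====
-- loop body of A's single for-loop (state = (gaps, in_gap, gap_start))
def pvStepA (min_gap_size : Int) (st : List Int × Bool × Int) (p : Int × Bool) :
    List Int × Bool × Int :=
  let gaps := st.1; let in_gap := st.2.1; let gap_start := st.2.2
  let i := p.1; let is_gap := p.2
  if is_gap ∧ ¬ in_gap then
    (gaps, true, i)
  else if ¬ is_gap ∧ in_gap then
    ((if i - gap_start ≥ min_gap_size then gaps ++ [PySem.Int.floordiv (gap_start + i) 2] else gaps),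
     false, gap_start)
  else st

def find_continuous_gaps_py (condition_array : List Bool) (min_gap_size : Int) : List Int :=
  ((PySem.List.enumerate condition_array 0).foldl (pvStepA min_gap_size) ([], false, 0)).1

-- ===== PORT B =====
-- runs[-1][2] += 1 : increment the length field of the last run, in place
def pvIncLast (runs : List (Bool × Int × Int)) : List (Bool × Int × Int) :=
  match runs with
  | [] => []
  | [(k, s, l)] => [(k, s, l + 1)]
  | r :: rest => r :: pvIncLast rest

-- stage-1 loop body of B (state = (runs, idx))
def pvStepB (st : List (Bool × Int × Int) × Int) (v : Bool) : List (Bool × Int × Int) × Int :=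
  let runs := st.1; let idx := st.2
  let runs' := match runs.getLast? with
    | some r => if r.1 == v then pvIncLast runs else runs ++ [(v, idx, 1)]
    | none => [(v, idx, 1)]
  (runs', idx + 1)

-- stage-2 comprehension body of B
def pvEmit (min_gap_size : Int) (runs : List (Bool × Int × Int)) : List Int :=
  runs.filterMap (fun r =>
    if r.1 ∧ r.2.2 ≥ min_gap_size then some (PySem.Int.floordiv (2 * r.2.1 + r.2.2) 2) else none)

def find_continuous_gaps_py_alt (condition_array : List Bool) (min_gap_size : Int) : List Int :=
  let st := condition_array.foldl pvStepB ([], 0)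
  pvEmit min_gap_size st.1.dropLast

-- ===== PRECONDITION & SPEC =====
def Spec_find_continuous_gaps_py (condition_array : List Bool) (min_gap_size : Int) (out : List Int) : Prop := out = find_continuous_gaps_py_alt condition_array min_gap_size
instance (condition_array : List Bool) (min_gap_size : Int) (out : List Int) : Decidable (Spec_find_continuous_gaps_py condition_array min_gap_size out) := by unfold Spec_find_continuous_gaps_py; infer_instance

-- ===== CLAIM (what is proved, stated in full; the proofs are below) =====
def Claim_equal_find_continuous_gaps_py : Prop := ∀ (condition_array : List Bool) (min_gap_size : Int), Dom_find_continuous_gaps_py condition_array min_gap_size → Spec_find_continuous_gaps_py condition_array min_gap_size (find_continuous_gaps_py condition_array min_gap_size)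

-- ===== LEMMAS AND PROOFS =====

theorem pvIncLast_cons_cons (r b : Bool × Int × Int) (t : List (Bool × Int × Int)) :
    pvIncLast (r :: b :: t) = r :: pvIncLast (b :: t) := rfl

theorem pvIncLast_ne_nil (r : Bool × Int × Int) (rest : List (Bool × Int × Int)) :
    pvIncLast (r :: rest) ≠ [] := by
  cases rest with
  | nil => obtain ⟨k, s, l⟩ := r; simp [pvIncLast]
  | cons b t => rw [pvIncLast_cons_cons]; simp

theorem pvIncLast_dropLast : ∀ (runs : List (Bool × Int × Int)),
    (pvIncLast runs).dropLast = runs.dropLast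
  | [] => rfl
  | [(_, _, _)] => rfl
  | r :: b :: t => by
      rw [pvIncLast_cons_cons]
      cases h : pvIncLast (b :: t) with
      | nil => exact absurd h (pvIncLast_ne_nil b t)
      | cons x xs =>
        have ih := pvIncLast_dropLast (b :: t)
        rw [h] at ih
        show r :: (x :: xs).dropLast = r :: (b :: t).dropLast
        rw [ih]

theorem pvIncLast_getLast? : ∀ (runs : List (Bool × Int × Int)),
    (pvIncLast runs).getLast? = runs.getLast?.map (fun r => (r.1, r.2.1, r.2.2 + 1))
  | [] => rfl
  | [(_, _, _)] => rfl
  | r :: b :: t => by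
      rw [pvIncLast_cons_cons]
      cases h : pvIncLast (b :: t) with
      | nil => exact absurd h (pvIncLast_ne_nil b t)
      | cons x xs =>
        rw [List.getLast?_cons_cons, ← h, pvIncLast_getLast? (b :: t),
            List.getLast?_cons_cons]

theorem pvEmit_append (m : Int) (xs ys : List (Bool × Int × Int)) :
    pvEmit m (xs ++ ys) = pvEmit m xs ++ pvEmit m ys := by
  simp [pvEmit, List.filterMap_append]

theorem pvEmit_last_false (m : Int) (runs : List (Bool × Int × Int)) (s l : Int)
    (h : runs.getLast? = some (false, s, l)) :
    pvEmit m runs = pvEmit m runs.dropLast := by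
  have hdec := List.dropLast_append_getLast? (l := runs) _ h
  calc pvEmit m runs = pvEmit m (runs.dropLast ++ [((false : Bool), s, l)]) := by rw [hdec]
    _ = pvEmit m runs.dropLast := by rw [pvEmit_append]; simp [pvEmit]

theorem pv_main (m : Int) (l : List Bool) : ∀ (i : Int) (gaps : List Int) (in_gap : Bool)
    (gs : Int) (runs : List (Bool × Int × Int)),
    gaps = pvEmit m runs.dropLast →
    in_gap = (match runs.getLast? with | some r => r.1 | none => false) →
    (in_gap = true → ∃ l0, runs.getLast? = some (true, gs, l0)) →
    (∀ k s0 l0, runs.getLast? = some (k, s0, l0) → s0 + l0 = i) →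
    ((PySem.List.enumerate l i).foldl (pvStepA m) (gaps, in_gap, gs)).1
      = pvEmit m (l.foldl pvStepB (runs, i)).1.dropLast := by
  induction l with
  | nil =>
    intro i gaps in_gap gs runs hg _ _ _
    simpa [PySem.List.enumerate] using hg
  | cons v t ih =>
    intro i gaps in_gap gs runs hg hflag hgs hsum
    rw [PySem.List.enumerate_cons, List.foldl_cons, List.foldl_cons]
    cases v
    · -- v = false
      cases hin : in_gap
      · -- in_gap = false : A keeps state; B appends/extends a false run
        subst hin
        have hA : pvStepA m (gaps, false, gs) (i, false) = (gaps, false, gs) := by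
          simp [pvStepA]
        rw [hA]
        cases hlast : runs.getLast? with
        | none =>
          have hruns : runs = [] := List.getLast?_eq_none_iff.mp hlast
          subst hruns
          have hB : pvStepB ([], i) false = ([((false : Bool), i, (1 : Int))], i + 1) := rfl
          rw [hB]
          refine ih (i + 1) gaps false gs [(false, i, 1)] (by simpa using hg) rfl ?_ ?_
          · intro h; simp at h
          · intro k s0 l0 h0; simp at h0; omega
        | some r =>
          obtain ⟨k, s0, l0⟩ := r
          have hk : k = false := by rw [hlast] at hflag; simpa using hflag.symm
          subst hk
          have hB : pvStepB (runs, i) false = (pvIncLast runs, i + 1) := by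
            simp [pvStepB, hlast]
          rw [hB]
          refine ih (i + 1) gaps false gs (pvIncLast runs) ?_ ?_ ?_ ?_
          · rw [pvIncLast_dropLast]; exact hg
          · rw [pvIncLast_getLast?, hlast]; rfl
          · intro h; simp at h
          · intro k' s' l' h'
            rw [pvIncLast_getLast?, hlast] at h'
            simp [Prod.ext_iff] at h'
            have hsl : s0 + l0 = i := hsum _ _ _ hlast
            omega
      · -- in_gap = true : A flushes the finished gap; B appends a new false run
        subst hin
        obtain ⟨l0, hlast⟩ := hgs rfl
        have hsl : gs + l0 = i := hsum _ _ _ hlast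
        have hA : pvStepA m (gaps, true, gs) (i, false)
            = ((if i - gs ≥ m then gaps ++ [PySem.Int.floordiv (gs + i) 2] else gaps),
               false, gs) := by
          simp [pvStepA]
        have hB : pvStepB (runs, i) false = (runs ++ [((false : Bool), i, (1 : Int))], i + 1) := by
          simp [pvStepB, hlast]
        rw [hA, hB]
        have hdec := List.dropLast_append_getLast? (l := runs) _ hlast
        have hone : pvEmit m [((true : Bool), gs, l0)]
            = (if i - gs ≥ m then [PySem.Int.floordiv (gs + i) 2] else []) := by
          have h2 : (2 : Int) * gs + l0 = gs + i := by omega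
          by_cases h : i - gs ≥ m
          · have hl : l0 ≥ m := by omega
            simp [pvEmit, h, hl, h2]
          · have hl : ¬ l0 ≥ m := by omega
            simp [pvEmit, h, hl]
        have hemit : pvEmit m runs
            = gaps ++ (if i - gs ≥ m then [PySem.Int.floordiv (gs + i) 2] else []) := by
          conv_lhs => rw [← hdec]
          rw [pvEmit_append, hone, hg]
        refine ih (i + 1)
            (if i - gs ≥ m then gaps ++ [PySem.Int.floordiv (gs + i) 2] else gaps)
            false gs (runs ++ [(false, i, 1)]) ?_ ?_ ?_ ?_
        · rw [List.dropLast_concat, hemit]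
          split_ifs <;> simp
        · simp
        · intro h; simp at h
        · intro k' s' l' h'; simp [Prod.ext_iff] at h'; omega
    · -- v = true
      cases hin : in_gap
      · -- in_gap = false : A starts a gap; B appends a new true run
        subst hin
        have hA : pvStepA m (gaps, false, gs) (i, true) = (gaps, true, i) := by
          simp [pvStepA]
        rw [hA]
        cases hlast : runs.getLast? with
        | none =>
          have hruns : runs = [] := List.getLast?_eq_none_iff.mp hlast
          subst hruns
          have hB : pvStepB ([], i) true = ([((true : Bool), i, (1 : Int))], i + 1) := rfl
          rw [hB]
          refine ih (i + 1) gaps true i [(true, i, 1)] (by simpa using hg) rfl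
            (fun _ => ⟨1, rfl⟩) ?_
          intro k' s' l' h'; simp [Prod.ext_iff] at h'; omega
        | some r =>
          obtain ⟨k, s0, l0⟩ := r
          have hk : k = false := by rw [hlast] at hflag; simpa using hflag.symm
          subst hk
          have hB : pvStepB (runs, i) true = (runs ++ [((true : Bool), i, (1 : Int))], i + 1) := by
            simp [pvStepB, hlast]
          rw [hB]
          refine ih (i + 1) gaps true i (runs ++ [(true, i, 1)]) ?_ (by simp)
            (fun _ => ⟨1, by simp⟩) ?_
          · rw [List.dropLast_concat, pvEmit_last_false m runs s0 l0 hlast]; exact hg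
          · intro k' s' l' h'; simp [Prod.ext_iff] at h'; omega
      · -- in_gap = true : A keeps state; B extends the true run
        subst hin
        obtain ⟨l0, hlast⟩ := hgs rfl
        have hA : pvStepA m (gaps, true, gs) (i, true) = (gaps, true, gs) := by
          simp [pvStepA]
        have hB : pvStepB (runs, i) true = (pvIncLast runs, i + 1) := by
          simp [pvStepB, hlast]
        rw [hA, hB]
        refine ih (i + 1) gaps true gs (pvIncLast runs) ?_ ?_ ?_ ?_
        · rw [pvIncLast_dropLast]; exact hg
        · rw [pvIncLast_getLast?, hlast]; rfl
        · intro _; exact ⟨l0 + 1, by rw [pvIncLast_getLast?, hlast]; rfl⟩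
        · intro k' s' l' h'
          rw [pvIncLast_getLast?, hlast] at h'
          simp at h'
          have := hsum _ _ _ hlast
          omega

-- ===== VERDICT (by name: the statement is the Claim_ definition above) =====
theorem find_continuous_gaps_py_spec : Claim_equal_find_continuous_gaps_py := by
  intro ca m _
  show find_continuous_gaps_py ca m = find_continuous_gaps_py_alt ca m
  unfold find_continuous_gaps_py find_continuous_gaps_py_alt
  exact pv_main m ca 0 [] false 0 [] rfl rfl (by intro h; simp at h)
    (by intro k s0 l0 h; simp at h)
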